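-- pv_equiv track=rewrite | github.com/dhanush005-rass/ZohoSP | Pyhton/Problems/Bookshelfsfilled.py | fullbs
-- ===== SOURCE A (Python) =====
-- def fullbs(numst, shlsz, lstbk):
--     carrybk = 0
--     fullself = 0
--     for books in lstbk:
--         total_books = books + carrybk
--         full_shelves = total_books // shlsz
--         fullself += full_shelves
--         carrybk = total_books % shlsz  # leftover for next student
--     # leftover after last student is discarded
--     return fullself
-- ===== SOURCE B (Python) =====
-- def fullbs(numst, shlsz, lstbk):
--     return sum(lstbk) // shlsz
-- ===== Notes on version B (the rewrite author's own statement) =====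
-- stated objective: simpler
-- what changed: The carry loop is replaced by the closed form sum(lstbk) // shlsz (the carry is exactly the running remainder), doing one C-level sum and a single division instead of a Python-level loop with a division and modulo per element.
-- outside the precondition, e.g. on fullbs(3, 0, []): A returns 0, B raises ZeroDivisionError; on fullbs(3, 0, [5]): A raises ZeroDivisionError, B raises ZeroDivisionError
import Mathlib
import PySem

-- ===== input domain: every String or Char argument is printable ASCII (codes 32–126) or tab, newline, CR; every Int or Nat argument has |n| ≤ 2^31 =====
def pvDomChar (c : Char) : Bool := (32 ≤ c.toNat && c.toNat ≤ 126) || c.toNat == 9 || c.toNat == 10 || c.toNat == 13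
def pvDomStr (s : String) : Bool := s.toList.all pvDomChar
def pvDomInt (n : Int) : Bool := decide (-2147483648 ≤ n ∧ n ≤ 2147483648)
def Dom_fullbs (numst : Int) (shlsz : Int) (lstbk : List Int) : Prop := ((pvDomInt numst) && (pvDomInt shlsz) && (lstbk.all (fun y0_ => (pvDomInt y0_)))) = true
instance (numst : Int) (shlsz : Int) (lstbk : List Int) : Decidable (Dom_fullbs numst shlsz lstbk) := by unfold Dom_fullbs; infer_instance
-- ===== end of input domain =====

-- B replaces A's carry loop by the closed form sum(lstbk) // shlsz (simpler, same cost).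


-- ===== PORT A =====
-- the for-loop over lstbk with state (carrybk, fullself)
def fullbs (numst : Int) (shlsz : Int) (lstbk : List Int) : Int :=
  let st := lstbk.foldl (fun (st : Int × Int) books =>
    let total_books := books + st.1
    let full_shelves := PySem.Int.floordiv total_books shlsz
    (PySem.Int.mod total_books shlsz, st.2 + full_shelves)) (0, 0)
  st.2

-- ===== PORT B =====
def fullbs_alt (numst : Int) (shlsz : Int) (lstbk : List Int) : Int :=
  PySem.Int.floordiv lstbk.sum shlsz

-- ===== PRECONDITION & SPEC =====
-- Pre_ excludes shlsz = 0: there A raises ZeroDivisionError on any nonempty lstbk, and its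
-- return of 0 on the empty list is an accident of the loop never running; B raises there.
def Pre_fullbs (numst : Int) (shlsz : Int) (lstbk : List Int) : Prop := shlsz ≠ 0
instance (numst : Int) (shlsz : Int) (lstbk : List Int) : Decidable (Pre_fullbs numst shlsz lstbk) := by unfold Pre_fullbs; infer_instance
def pvWitness_fullbs : Int × Int × List Int := (3, 4, [5, 2, 9])

def Spec_fullbs (numst : Int) (shlsz : Int) (lstbk : List Int) (out : Int) : Prop := out = fullbs_alt numst shlsz lstbk
instance (numst : Int) (shlsz : Int) (lstbk : List Int) (out : Int) : Decidable (Spec_fullbs numst shlsz lstbk out) := by unfold Spec_fullbs; infer_instance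

-- ===== CLAIM (what is proved, stated in full; the proofs are below) =====
def Claim_equal_fullbs : Prop := ∀ (numst : Int) (shlsz : Int) (lstbk : List Int), Dom_fullbs numst shlsz lstbk → Pre_fullbs numst shlsz lstbk → Spec_fullbs numst shlsz lstbk (fullbs numst shlsz lstbk)

-- ===== LEMMAS AND PROOFS =====

-- (x.fmod s + r) has the same fdiv as (x + r), shifted by x's quotient
theorem fdiv_fmod_add (s x r : Int) (hs : s ≠ 0) :
    (Int.fmod x s + r).fdiv s = (x + r).fdiv s - x.fdiv s := by
  have h : x + r = Int.fmod x s + r + (x.fdiv s) * s := by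
    have := Int.mul_fdiv_add_fmod x s
    linarith
  rw [h, Int.add_mul_fdiv_right _ _ hs]
  ring

-- adding a carry that is an fmod value does not change the residue
theorem fmod_add_fmod (s b x : Int) : (b + Int.fmod x s).fmod s = (b + x).fmod s := by
  have h : b + x = b + Int.fmod x s + (x.fdiv s) * s := by
    have := Int.mul_fdiv_add_fmod x s
    linarith
  rw [h, Int.add_mul_fmod_self_right]

-- loop invariant: from a state whose carry is a genuine fmod value, the loop computes the closed form
theorem loop_closed (s : Int) (hs : s ≠ 0) (l : List Int) : ∀ (x f : Int),
    (l.foldl (fun (st : Int × Int) books =>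
      ((books + st.1).fmod s, st.2 + (books + st.1).fdiv s)) (Int.fmod x s, f)).2
    = f + (x + l.sum).fdiv s - x.fdiv s := by
  induction l with
  | nil =>
    intro x f
    simp
  | cons b t ih =>
    intro x f
    simp only [List.foldl_cons, List.sum_cons]
    rw [fmod_add_fmod s b x, ih (b + x) (f + (b + Int.fmod x s).fdiv s)]
    have h1 : (b + Int.fmod x s).fdiv s = (x + b).fdiv s - x.fdiv s := by
      rw [add_comm b (Int.fmod x s)]; exact fdiv_fmod_add s x b hs
    rw [h1, add_comm b x, add_assoc]
    ring_nf

-- ===== VERDICT (by name: the statement is the Claim_ definition above) =====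
theorem fullbs_spec : Claim_equal_fullbs := by
  intro numst shlsz lstbk _ hpre
  unfold Spec_fullbs fullbs fullbs_alt
  simp only [PySem.Int.mod, PySem.Int.floordiv]
  have h0 : ((0 : Int), (0 : Int)) = (Int.fmod 0 shlsz, (0 : Int)) := by simp
  rw [h0, loop_closed shlsz hpre lstbk 0 0]
  simp
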